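-- pv_equiv track=rewrite | github.com/teukufaiz/PANTAU | pantau.py | map_to_aspect
-- ===== SOURCE A (Python) =====
-- def map_to_aspect(domain_name):
--     d = str(domain_name).upper()
--     if any(x in d for x in ['EDM', 'TATA KELOLA']):                             return 'EDM'
--     if any(x in d for x in ['APO', 'PERENCANAAN', 'ARSITEKTUR', 'RESIKO']):    return 'APO'
--     if any(x in d for x in ['BAI', 'PENGEMBANGAN', 'TEKNOLOGI']):              return 'BAI'
--     if any(x in d for x in ['DSS', 'OPERASIONAL', 'JARINGAN', 'SIBER', 'PEMULIHAN']): return 'DSS'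
--     if any(x in d for x in ['MEA', 'AUDIT']):                                  return 'MEA'
--     return 'DSS'
-- ===== SOURCE B (Python) =====
-- # B: one flat keyword->priority table scanned once; the result is the category
-- # of the MINIMUM matched priority (no ordered short-circuit branch chain).
-- KEYWORD_PRIORITY = (
--     ('EDM', 0), ('TATA KELOLA', 0),
--     ('APO', 1), ('PERENCANAAN', 1), ('ARSITEKTUR', 1), ('RESIKO', 1),
--     ('BAI', 2), ('PENGEMBANGAN', 2), ('TEKNOLOGI', 2),
--     ('DSS', 3), ('OPERASIONAL', 3), ('JARINGAN', 3), ('SIBER', 3), ('PEMULIHAN', 3),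
--     ('MEA', 4), ('AUDIT', 4),
-- )
-- CATEGORIES = ('EDM', 'APO', 'BAI', 'DSS', 'MEA')
--
-- def map_to_aspect(domain_name):
--     d = str(domain_name).upper()
--     hits = [prio for kw, prio in KEYWORD_PRIORITY if kw in d]
--     if not hits:
--         return 'DSS'
--     return CATEGORIES[min(hits)]
-- ===== Notes on version B (the rewrite author's own statement) =====
-- stated objective: alternative
-- what changed: Instead of testing five keyword groups in priority order with short-circuit returns, B scans one flat keyword-to-priority table once, collects the priorities of ALL matching keywords, and returns the category at the minimum matched priority (default DSS when nothing matches).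
import Mathlib
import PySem

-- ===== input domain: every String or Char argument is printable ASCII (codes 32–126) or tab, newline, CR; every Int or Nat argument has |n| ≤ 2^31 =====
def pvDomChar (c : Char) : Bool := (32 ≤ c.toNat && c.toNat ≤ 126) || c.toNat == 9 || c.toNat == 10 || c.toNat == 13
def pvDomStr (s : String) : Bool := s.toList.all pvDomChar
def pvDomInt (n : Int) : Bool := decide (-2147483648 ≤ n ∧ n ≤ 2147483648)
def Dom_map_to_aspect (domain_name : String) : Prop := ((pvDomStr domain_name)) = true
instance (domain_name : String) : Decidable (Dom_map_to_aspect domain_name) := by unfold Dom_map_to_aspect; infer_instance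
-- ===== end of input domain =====

-- B scans one flat keyword→priority table once, collecting the priorities of ALL
-- matching keywords, and returns the category at the minimum matched priority
-- (default "DSS") — an alternative to A's ordered short-circuit branch chain.

-- ===== PORT A =====
def map_to_aspect (domain_name : String) : String :=
  let d := PySem.Str.upper domain_name
  if (["EDM", "TATA KELOLA"]).any (fun x => PySem.Str.isIn x d) then "EDM"
  else if (["APO", "PERENCANAAN", "ARSITEKTUR", "RESIKO"]).any (fun x => PySem.Str.isIn x d) then "APO"
  else if (["BAI", "PENGEMBANGAN", "TEKNOLOGI"]).any (fun x => PySem.Str.isIn x d) then "BAI"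
  else if (["DSS", "OPERASIONAL", "JARINGAN", "SIBER", "PEMULIHAN"]).any (fun x => PySem.Str.isIn x d) then "DSS"
  else if (["MEA", "AUDIT"]).any (fun x => PySem.Str.isIn x d) then "MEA"
  else "DSS"

-- ===== PORT B =====
def kwPriority : List (String × Nat) :=
  [("EDM", 0), ("TATA KELOLA", 0),
   ("APO", 1), ("PERENCANAAN", 1), ("ARSITEKTUR", 1), ("RESIKO", 1),
   ("BAI", 2), ("PENGEMBANGAN", 2), ("TEKNOLOGI", 2),
   ("DSS", 3), ("OPERASIONAL", 3), ("JARINGAN", 3), ("SIBER", 3), ("PEMULIHAN", 3),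
   ("MEA", 4), ("AUDIT", 4)]

def categories : List String := ["EDM", "APO", "BAI", "DSS", "MEA"]

-- hits = [prio for kw, prio in KEYWORD_PRIORITY if kw in d]
def hitsOf (d : String) : List Nat :=
  (kwPriority.filter (fun p => PySem.Str.isIn p.1 d)).map Prod.snd

def map_to_aspect_alt (domain_name : String) : String :=
  let d := PySem.Str.upper domain_name
  match hitsOf d with
  | [] => "DSS"
  -- CATEGORIES[min(hits)]: Python's min over the nonempty list hits = y :: t;
  -- every priority is < 5 = categories.length, so plain getD indexing is exact.
  | y :: t => categories.getD (t.foldl min y) "DSS"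

-- ===== PRECONDITION & SPEC =====
def Spec_map_to_aspect (domain_name : String) (out : String) : Prop := out = map_to_aspect_alt domain_name
instance (domain_name : String) (out : String) : Decidable (Spec_map_to_aspect domain_name out) := by unfold Spec_map_to_aspect; infer_instance

-- ===== CLAIM (what is proved, stated in full; the proofs are below) =====
def Claim_equal_map_to_aspect : Prop := ∀ (domain_name : String), Dom_map_to_aspect domain_name → Spec_map_to_aspect domain_name (map_to_aspect domain_name)

-- ===== LEMMAS AND PROOFS =====

-- the five priority groups of the flat table
def g0 : List (String × Nat) := [("EDM", 0), ("TATA KELOLA", 0)]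
def g1 : List (String × Nat) := [("APO", 1), ("PERENCANAAN", 1), ("ARSITEKTUR", 1), ("RESIKO", 1)]
def g2 : List (String × Nat) := [("BAI", 2), ("PENGEMBANGAN", 2), ("TEKNOLOGI", 2)]
def g3 : List (String × Nat) := [("DSS", 3), ("OPERASIONAL", 3), ("JARINGAN", 3), ("SIBER", 3), ("PEMULIHAN", 3)]
def g4 : List (String × Nat) := [("MEA", 4), ("AUDIT", 4)]

def grpHits (g : List (String × Nat)) (d : String) : List Nat :=
  (g.filter (fun p => PySem.Str.isIn p.1 d)).map Prod.snd

lemma hitsOf_split (d : String) :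
    hitsOf d = grpHits g0 d ++ (grpHits g1 d ++ (grpHits g2 d ++ (grpHits g3 d ++ grpHits g4 d))) := by
  unfold hitsOf grpHits
  rw [show kwPriority = g0 ++ (g1 ++ (g2 ++ (g3 ++ g4))) from rfl]
  simp [List.filter_append]

lemma grp_all (g : List (String × Nat)) (c : Nat) (hg : ∀ p ∈ g, p.2 = c) (d : String) :
    ∀ x ∈ grpHits g d, x = c := by
  intro x hx
  simp only [grpHits, List.mem_map, List.mem_filter] at hx
  obtain ⟨p, ⟨hp, _⟩, rfl⟩ := hx
  exact hg p hp

lemma grp_nil_iff (g : List (String × Nat)) (d : String) :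
    grpHits g d = [] ↔ (g.map Prod.fst).any (fun x => PySem.Str.isIn x d) = false := by
  simp [grpHits, List.filter_eq_nil_iff, List.any_eq_false]

lemma grp_ne_nil_iff (g : List (String × Nat)) (d : String) :
    grpHits g d ≠ [] ↔ (g.map Prod.fst).any (fun x => PySem.Str.isIn x d) = true := by
  rw [Ne, grp_nil_iff]
  simp

lemma foldl_min_init_le (l : List Nat) (a : Nat) : l.foldl min a ≤ a := by
  induction l generalizing a with
  | nil => exact le_rfl
  | cons y t ih => exact le_trans (ih (min a y)) (min_le_left a y)

lemma foldl_min_le_mem (l : List Nat) : ∀ (a x : Nat), x ∈ l → l.foldl min a ≤ x := by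
  induction l with
  | nil => intro a x h; cases h
  | cons y t ih =>
      intro a x h
      rcases List.mem_cons.1 h with rfl | hx
      · exact le_trans (foldl_min_init_le t (min a x)) (min_le_right a x)
      · exact ih (min a y) x hx

lemma le_foldl_min (l : List Nat) (a c : Nat) (ha : c ≤ a) (h : ∀ x ∈ l, c ≤ x) :
    c ≤ l.foldl min a := by
  induction l generalizing a with
  | nil => exact ha
  | cons y t ih =>
      exact ih (min a y) (le_min ha (h y List.mem_cons_self))
        (fun x hx => h x (List.mem_cons_of_mem y hx))

-- B's value when k is a matched priority and a lower bound of all matched priorities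
lemma alt_eq_of (d : String) (k : Nat)
    (hk : k ∈ hitsOf (PySem.Str.upper d))
    (hall : ∀ x ∈ hitsOf (PySem.Str.upper d), k ≤ x) :
    map_to_aspect_alt d = categories.getD k "DSS" := by
  unfold map_to_aspect_alt
  rcases hh : hitsOf (PySem.Str.upper d) with _ | ⟨y, t⟩
  · rw [hh] at hk; cases hk
  · rw [hh] at hk hall
    have hmin : t.foldl min y = k := by
      apply le_antisymm
      · rcases List.mem_cons.1 hk with rfl | hkt
        · exact foldl_min_init_le t k
        · exact foldl_min_le_mem t y k hkt
      · exact le_foldl_min t y k (hall y List.mem_cons_self)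
          (fun x hx => hall x (List.mem_cons_of_mem y hx))
    simp only [hh, hmin]

-- membership of priority c in hitsOf, given its group is nonempty
lemma mem_hits_of_grp {g : List (String × Nat)} {c : Nat} (d : String)
    (hg : ∀ p ∈ g, p.2 = c)
    (hsub : ∀ x, x ∈ grpHits g d → x ∈ hitsOf d)
    (hne : grpHits g d ≠ []) : c ∈ hitsOf d := by
  obtain ⟨y, t, hyt⟩ := List.exists_cons_of_ne_nil hne
  have hy : y ∈ grpHits g d := hyt ▸ List.mem_cons_self
  have := grp_all g c hg d y hy
  exact this ▸ hsub y hy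

-- ===== VERDICT (by name: the statement is the Claim_ definition above) =====
theorem map_to_aspect_spec : Claim_equal_map_to_aspect := by
  intro d _
  unfold Spec_map_to_aspect
  simp only [map_to_aspect]
  set u := PySem.Str.upper d with hu
  have hsplit := hitsOf_split u
  have a0 := grp_all g0 0 (by decide) u
  have a1 := grp_all g1 1 (by decide) u
  have a2 := grp_all g2 2 (by decide) u
  have a3 := grp_all g3 3 (by decide) u
  have a4 := grp_all g4 4 (by decide) u
  -- every matched priority together with its group's nonemptiness condition
  have hmem : ∀ x ∈ hitsOf u,
      x ∈ grpHits g0 u ∨ x ∈ grpHits g1 u ∨ x ∈ grpHits g2 u ∨ x ∈ grpHits g3 u ∨ x ∈ grpHits g4 u := by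
    intro x hx
    rw [hsplit] at hx
    simpa [List.mem_append, or_assoc] using hx
  by_cases h0 : (["EDM", "TATA KELOLA"]).any (fun x => PySem.Str.isIn x u) = true
  case pos =>
    have hne : grpHits g0 u ≠ [] := (grp_ne_nil_iff g0 u).mpr h0
    have hk : (0 : Nat) ∈ hitsOf u :=
      mem_hits_of_grp u (by decide) (fun x hx => hsplit ▸ List.mem_append_left _ hx) hne
    rw [alt_eq_of d 0 hk (fun x _ => Nat.zero_le x), if_pos h0]
    rfl
  case neg =>
  have e0 : grpHits g0 u = [] := (grp_nil_iff g0 u).mpr (Bool.eq_false_iff.mpr h0)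
  by_cases h1 : (["APO", "PERENCANAAN", "ARSITEKTUR", "RESIKO"]).any (fun x => PySem.Str.isIn x u) = true
  case pos =>
    have hne : grpHits g1 u ≠ [] := (grp_ne_nil_iff g1 u).mpr h1
    have hk : (1 : Nat) ∈ hitsOf u :=
      mem_hits_of_grp u (by decide)
        (fun x hx => hsplit ▸ List.mem_append_right _ (List.mem_append_left _ hx)) hne
    have hall : ∀ x ∈ hitsOf u, 1 ≤ x := by
      intro x hx
      rcases hmem x hx with hg | hg | hg | hg | hg
      · rw [e0] at hg; cases hg
      · have := a1 x hg; omega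
      · have := a2 x hg; omega
      · have := a3 x hg; omega
      · have := a4 x hg; omega
    rw [alt_eq_of d 1 hk hall, if_neg h0, if_pos h1]
    rfl
  case neg =>
  have e1 : grpHits g1 u = [] := (grp_nil_iff g1 u).mpr (Bool.eq_false_iff.mpr h1)
  by_cases h2 : (["BAI", "PENGEMBANGAN", "TEKNOLOGI"]).any (fun x => PySem.Str.isIn x u) = true
  case pos =>
    have hne : grpHits g2 u ≠ [] := (grp_ne_nil_iff g2 u).mpr h2
    have hk : (2 : Nat) ∈ hitsOf u :=
      mem_hits_of_grp u (by decide)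
        (fun x hx => hsplit ▸ List.mem_append_right _ (List.mem_append_right _ (List.mem_append_left _ hx))) hne
    have hall : ∀ x ∈ hitsOf u, 2 ≤ x := by
      intro x hx
      rcases hmem x hx with hg | hg | hg | hg | hg
      · rw [e0] at hg; cases hg
      · rw [e1] at hg; cases hg
      · have := a2 x hg; omega
      · have := a3 x hg; omega
      · have := a4 x hg; omega
    rw [alt_eq_of d 2 hk hall, if_neg h0, if_neg h1, if_pos h2]
    rfl
  case neg =>
  have e2 : grpHits g2 u = [] := (grp_nil_iff g2 u).mpr (Bool.eq_false_iff.mpr h2)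
  by_cases h3 : (["DSS", "OPERASIONAL", "JARINGAN", "SIBER", "PEMULIHAN"]).any (fun x => PySem.Str.isIn x u) = true
  case pos =>
    have hne : grpHits g3 u ≠ [] := (grp_ne_nil_iff g3 u).mpr h3
    have hk : (3 : Nat) ∈ hitsOf u :=
      mem_hits_of_grp u (by decide)
        (fun x hx => hsplit ▸ List.mem_append_right _ (List.mem_append_right _ (List.mem_append_right _ (List.mem_append_left _ hx)))) hne
    have hall : ∀ x ∈ hitsOf u, 3 ≤ x := by
      intro x hx
      rcases hmem x hx with hg | hg | hg | hg | hg
      · rw [e0] at hg; cases hg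
      · rw [e1] at hg; cases hg
      · rw [e2] at hg; cases hg
      · have := a3 x hg; omega
      · have := a4 x hg; omega
    rw [alt_eq_of d 3 hk hall, if_neg h0, if_neg h1, if_neg h2, if_pos h3]
    rfl
  case neg =>
  have e3 : grpHits g3 u = [] := (grp_nil_iff g3 u).mpr (Bool.eq_false_iff.mpr h3)
  by_cases h4 : (["MEA", "AUDIT"]).any (fun x => PySem.Str.isIn x u) = true
  case pos =>
    have hne : grpHits g4 u ≠ [] := (grp_ne_nil_iff g4 u).mpr h4
    have hk : (4 : Nat) ∈ hitsOf u :=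
      mem_hits_of_grp u (by decide)
        (fun x hx => hsplit ▸ List.mem_append_right _ (List.mem_append_right _ (List.mem_append_right _ (List.mem_append_right _ hx)))) hne
    have hall : ∀ x ∈ hitsOf u, 4 ≤ x := by
      intro x hx
      rcases hmem x hx with hg | hg | hg | hg | hg
      · rw [e0] at hg; cases hg
      · rw [e1] at hg; cases hg
      · rw [e2] at hg; cases hg
      · rw [e3] at hg; cases hg
      · have := a4 x hg; omega
    rw [alt_eq_of d 4 hk hall, if_neg h0, if_neg h1, if_neg h2, if_neg h3, if_pos h4]
    rfl
  case neg =>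
  have e4 : grpHits g4 u = [] := (grp_nil_iff g4 u).mpr (Bool.eq_false_iff.mpr h4)
  have hnil : hitsOf u = [] := by
    rw [hsplit, e0, e1, e2, e3, e4]; rfl
  rw [if_neg h0, if_neg h1, if_neg h2, if_neg h3, if_neg h4]
  simp only [map_to_aspect_alt, ← hu, hnil]
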